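-- pv_equiv track=rewrite | github.com/Bonkahr/Python-Journey | turing/exam.py | solution
-- ===== SOURCE A (Python) =====
-- def solution(cards):
--     res = -1
--
--     for c in cards:
--         for i in c:
--             k = c.count(i)
--             if k == 1 and i > res:
--                 res = i
--     return res
-- ===== SOURCE B (Python) =====
-- def solution(cards):
--     best = -1
--     for c in cards:
--         s = sorted(c)
--         i, n = 0, len(s)
--         while i < n:
--             j = i + 1
--             while j < n and s[j] == s[i]:
--                 j += 1
--             if j - i == 1 and s[i] > best:
--                 best = s[i]
--             i = j
--     return best
-- ===== Notes on version B (the rewrite author's own statement) =====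
-- stated objective: faster
-- what changed: B sorts each card and scans it once grouping equal adjacent elements, taking a run of length 1 as a singleton, instead of A's per-element repeated list.count scan.
import Mathlib
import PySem

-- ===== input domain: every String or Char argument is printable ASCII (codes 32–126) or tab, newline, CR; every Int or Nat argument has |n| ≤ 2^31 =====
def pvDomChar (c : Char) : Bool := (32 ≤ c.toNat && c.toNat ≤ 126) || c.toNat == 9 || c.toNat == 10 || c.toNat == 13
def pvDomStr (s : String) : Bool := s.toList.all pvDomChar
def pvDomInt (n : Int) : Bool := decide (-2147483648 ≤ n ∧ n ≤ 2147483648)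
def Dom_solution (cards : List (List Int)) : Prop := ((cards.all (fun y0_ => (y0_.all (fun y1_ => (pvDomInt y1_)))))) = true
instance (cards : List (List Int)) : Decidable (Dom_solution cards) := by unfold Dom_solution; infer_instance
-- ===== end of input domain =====

-- B sorts each card and scans it once grouping equal adjacent elements (a run of length 1 is a
-- singleton), replacing A's per-element repeated list.count scan.

-- ===== PORT A =====
def solution (cards : List (List Int)) : Int :=
  cards.foldl (fun res c =>
    c.foldl (fun res i => if PySem.List.count c i = 1 ∧ i > res then i else res) res) (-1)

-- ===== PORT B =====
-- the two nested 'while' loops of Source B: consume the run of elements equal to the head,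
-- test its length, continue at the first different element
def runScan (best : Int) (s : List Int) : Int :=
  match s with
  | [] => best
  | x :: rest =>
      runScan (if (rest.takeWhile (fun y => y == x)).length = 0 ∧ x > best then x else best)
              (rest.dropWhile (fun y => y == x))
termination_by s.length
decreasing_by
  simp only [List.length_cons]
  exact Nat.lt_succ_of_le (List.length_dropWhile_le _ _)

def solution_alt (cards : List (List Int)) : Int :=
  cards.foldl (fun best c => runScan best (PySem.List.sorted c (fun x => x) false)) (-1)

-- ===== PRECONDITION & SPEC =====
def Spec_solution (cards : List (List Int)) (out : Int) : Prop := out = solution_alt cards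
instance (cards : List (List Int)) (out : Int) : Decidable (Spec_solution cards out) := by unfold Spec_solution; infer_instance

-- ===== CLAIM (what is proved, stated in full; the proofs are below) =====
def Claim_equal_solution : Prop := ∀ (cards : List (List Int)), Dom_solution cards → Spec_solution cards (solution cards)

-- ===== LEMMAS AND PROOFS =====

theorem dropWhile_head_false {α : Type} (p : α → Bool) :
    ∀ (l : List α) (h : α) (t : List α), l.dropWhile p = h :: t → p h = false := by
  intro l
  induction l with
  | nil => intro h t he; simp [List.dropWhile] at he
  | cons a l ih =>
      intro h t he
      by_cases hp : p a
      · rw [List.dropWhile_cons_of_pos hp] at he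
        exact ih h t he
      · rw [List.dropWhile_cons_of_neg hp] at he
        obtain ⟨rfl, rfl⟩ := List.cons.injEq .. ▸ he
        exact Bool.of_not_eq_true hp

-- A's inner loop is the running max over the singletons of c
theorem a_inner (c : List Int) (r : Int) :
    c.foldl (fun res i => if PySem.List.count c i = 1 ∧ i > res then i else res) r
    = (c.filter (fun i => decide (List.count i c = 1))).foldl max r := by
  have h1 : c.foldl (fun res i => if PySem.List.count c i = 1 ∧ i > res then i else res) r
      = c.foldl (fun res i => if List.count i c = 1 then max res i else res) r := by
    apply PySem.List.foldl_congr_mem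
    intro acc x _
    dsimp only
    by_cases h : List.count x c = 1
    · have h1 : ((List.count x c : Nat) : Int) = 1 := by exact_mod_cast h
      by_cases hg : x > acc
      · rw [if_pos ⟨by simpa [PySem.List.count] using h1, hg⟩, if_pos h]; omega
      · rw [if_neg (fun hc => hg hc.2), if_pos h]; omega
    · have h1 : ((List.count x c : Nat) : Int) ≠ 1 := by exact_mod_cast h
      rw [if_neg (fun hc => h1 (by simpa [PySem.List.count] using hc.1)), if_neg h]
  rw [h1, PySem.List.foldl_ite_eq_foldl_filter]

-- B's run scan over a sorted list is the running max over its singletons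
theorem runScan_eq : ∀ (n : Nat) (s : List Int), s.length ≤ n → s.Pairwise (· ≤ ·) → ∀ r : Int,
    runScan r s = (s.filter (fun i => decide (List.count i s = 1))).foldl max r := by
  intro n
  induction n with
  | zero =>
      intro s hn _ r
      have : s = [] := List.eq_nil_of_length_eq_zero (Nat.le_zero.mp hn)
      subst this; simp [runScan]
  | succ n ih =>
      intro s hn hs r
      match s with
      | [] => simp [runScan]
      | x :: rest =>
        set run := rest.takeWhile (fun y => y == x) with hrun_def
        set rest' := rest.dropWhile (fun y => y == x) with hrest'_def
        have hsplit : rest = run ++ rest' := (List.takeWhile_append_dropWhile).symm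
        have hxle : ∀ y ∈ rest, x ≤ y := (List.pairwise_cons.mp hs).1
        have hrestp : rest.Pairwise (· ≤ ·) := (List.pairwise_cons.mp hs).2
        have hrun_eq : ∀ y ∈ run, y = x := by
          intro y hy
          have := List.mem_takeWhile_imp hy
          simpa using this
        have hrest'p : rest'.Pairwise (· ≤ ·) :=
          hrestp.sublist (List.dropWhile_sublist _)
        have hgt : ∀ y ∈ rest', x < y := by
          intro y hy
          cases hre : rest' with
          | nil => rw [hre] at hy; simp at hy
          | cons h t =>
              have hhF : (h == x) = false := dropWhile_head_false _ rest h t (hrest'_def ▸ hre)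
              have hhne : h ≠ x := by simpa using hhF
              have hhmem : h ∈ rest := (List.dropWhile_sublist (p := fun y => y == x) (l := rest)).mem (by rw [← hrest'_def, hre]; exact List.mem_cons_self ..)
              have hxh : x < h := lt_of_le_of_ne (hxle h hhmem) (Ne.symm hhne)
              rw [hre] at hy hrest'p
              rcases List.mem_cons.mp hy with rfl | hyt
              · exact hxh
              · exact lt_of_lt_of_le hxh ((List.pairwise_cons.mp hrest'p).1 y hyt)
        have hxnot : x ∉ rest' := fun hx => lt_irrefl x (hgt x hx)
        have hz : List.count x rest' = 0 := List.count_eq_zero.mpr hxnot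
        have hcount_run : List.count x run = run.length :=
          List.count_eq_length.mpr (fun y hy => (hrun_eq y hy).symm)
        have hcx : List.count x (x :: rest) = run.length + 1 := by
          rw [List.count_cons_self]
          conv_lhs => rw [hsplit]
          rw [List.count_append]
          omega
        have hcy : ∀ y ∈ rest', List.count y (x :: rest) = List.count y rest' := by
          intro y hy
          have hyne : y ≠ x := fun h => hxnot (h ▸ hy)
          have hzr : List.count y run = 0 :=
            List.count_eq_zero.mpr (fun hyr => hyne (hrun_eq y hyr))
          rw [List.count_cons]
          conv_lhs => rw [hsplit]
          rw [List.count_append, hzr]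
          simp
          exact fun h => hyne h.symm
        have hlen : rest'.length ≤ n := by
          have h1 : rest'.length ≤ rest.length := List.length_dropWhile_le _ _
          have h2 : rest.length + 1 ≤ n + 1 := by simpa using hn
          omega
        have hIH := ih rest' hlen hrest'p
        have hfall : (x :: rest).filter (fun i => decide (List.count i (x :: rest) = 1))
            = (if run.length = 0 then [x] else [])
              ++ rest'.filter (fun i => decide (List.count i rest' = 1)) := by
          set P : Int → Bool := fun i => decide (List.count i (x :: rest) = 1) with hP
          have hPx : P x = decide (run.length = 0) := by
            rw [hP]
            exact decide_eq_decide.mpr (by rw [hcx]; omega)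
          have ha : run.filter P = [] := by
            apply List.filter_eq_nil_iff.mpr
            intro y hy
            have hne : 0 < run.length := List.length_pos_iff.mpr (fun h => by rw [h] at hy; simp at hy)
            have hyx := hrun_eq y hy
            subst hyx
            intro hcontra
            rw [hP] at hcontra
            have h1 : List.count y (y :: rest) = 1 := by simpa using hcontra
            omega
          have hb : rest'.filter P = rest'.filter (fun i => decide (List.count i rest' = 1)) :=
            List.filter_congr (fun y hy => by rw [hP]; simp [hcy y hy])
          rw [List.filter_cons]
          have hrw : rest.filter P
              = rest'.filter (fun i => decide (List.count i rest' = 1)) := by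
            conv_lhs => rw [hsplit]
            rw [List.filter_append, ha, hb, List.nil_append]
          rw [hrw, hPx]
          by_cases hre : run.length = 0 <;> simp [hre]
        show runScan _ _ = _
        rw [runScan, ← hrun_def, ← hrest'_def, hfall]
        by_cases hre : run.length = 0
        · have hbest : (if run.length = 0 ∧ x > r then x else r) = max r x := by
            by_cases hg : x > r
            · rw [if_pos ⟨hre, hg⟩]; omega
            · rw [if_neg (fun hc => hg hc.2)]; omega
          rw [hbest, hIH (max r x), if_pos hre, List.singleton_append, List.foldl_cons]
        · have hbest : (if run.length = 0 ∧ x > r then x else r) = r :=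
            if_neg (fun hc => hre hc.1)
          rw [hbest, hIH r, if_neg hre, List.nil_append]

-- the singleton lists of c and of sorted c are permutations; a max-fold ignores the order
theorem filter_perm_fold (c : List Int) (r : Int) :
    (c.filter (fun i => decide (List.count i c = 1))).foldl max r
    = ((PySem.List.sorted c (fun x => x) false).filter
        (fun i => decide (List.count i (PySem.List.sorted c (fun x => x) false) = 1))).foldl max r := by
  set s := PySem.List.sorted c (fun x => x) false with hs
  have hperm : s.Perm c := PySem.List.sorted_perm c _ _
  have hnd : ∀ (l : List Int), (l.filter (fun i => decide (List.count i l = 1))).Nodup := by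
    intro l
    apply List.nodup_iff_count_le_one.mpr
    intro y
    by_cases hy : y ∈ l.filter (fun i => decide (List.count i l = 1))
    · have hm := List.mem_filter.mp hy
      have h1 : List.count y l = 1 := of_decide_eq_true hm.2
      calc List.count y (l.filter (fun i => decide (List.count i l = 1)))
          ≤ List.count y l := List.filter_sublist.count_le y
        _ = 1 := h1
    · simp [List.count_eq_zero_of_not_mem hy]
  have hmemeq : ∀ y, y ∈ c.filter (fun i => decide (List.count i c = 1))
      ↔ y ∈ s.filter (fun i => decide (List.count i s = 1)) := by
    intro y
    simp only [List.mem_filter, decide_eq_true_eq]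
    rw [hperm.mem_iff, hperm.count_eq]
  have hp : (c.filter (fun i => decide (List.count i c = 1))).Perm
      (s.filter (fun i => decide (List.count i s = 1))) :=
    (List.perm_ext_iff_of_nodup (hnd c) (hnd s)).mpr hmemeq
  exact hp.foldl_eq' (fun x _ y _ z => by rw [max_right_comm]) r

theorem solution_eq_alt (cards : List (List Int)) : solution cards = solution_alt cards := by
  unfold solution solution_alt
  apply PySem.List.foldl_congr_mem
  intro acc c _
  dsimp only
  rw [a_inner, filter_perm_fold]
  exact (runScan_eq (PySem.List.sorted c (fun x => x) false).length _ le_rfl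
    (by simpa using PySem.List.sorted_pairwise c (fun x => x)) acc).symm

-- ===== VERDICT (by name: the statement is the Claim_ definition above) =====
theorem solution_spec : Claim_equal_solution := by
  intro cards _
  unfold Spec_solution
  exact solution_eq_alt cards
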